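-- pv_equiv track=rewrite | github.com/jbkinney/24_posfai2 | posfai2.py | ohe_to_sim_spec
-- ===== SOURCE A (Python) =====
-- def my_expand(x):
--     """
--     Expands a list of lists. Simulates product expansion
--     """
--     if len(x) >= 1:
--         a = x[0]
--         b = x[1:]
--         b_exp = my_expand(b)
--         c = [[y]+z for z in b_exp for y in a]
--         return c
--     else:
--         return [x]
--
-- def ohe_to_sim_spec(ohe_spec_str):
--     a = ohe_spec_str.split('+')
--     b = [z.split('x') for z in a]
--     for i in range(len(b)):
--         for j in range(len(b[i])):
--             z = b[i][j]
--             if z != '.':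
--                 b[i][j] = ['.', z]
--
--     # Recursive expansion
--     c = []
--     for i, b_el in enumerate(b):
--         if isinstance(b_el, str):
--             c.append([b_el])
--         elif isinstance(b_el, list) and len(b_el) >= 1:
--             c.extend(my_expand(b_el))
--
--     # Remove redundant factors of '.'
--     sim_spec_list = []
--     for x in c:
--         y = [z for z in x if z != '.']
--         if len(y) == 0:
--             y = ['.']
--         sim_spec_list.append(y)
--     sim_spec_str = '+'.join(['x'.join(z) for z in sim_spec_list])
--     return sim_spec_str
-- ===== SOURCE B (Python) =====
-- def ohe_to_sim_spec(ohe_spec_str):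
--     # Each group is a subset enumeration: every factor expands to ['.', token]
--     # (or just '.'), and '.' choices are dropped afterwards, so the combos of a
--     # group are exactly the subsets of its non-'.' tokens, enumerated by a bit
--     # counter whose bit i (first token = bit 0, varying fastest) selects token i.
--     parts = []
--     for g in ohe_spec_str.split('+'):
--         toks = [t for t in g.split('x') if t != '.']
--         for n in range(1 << len(toks)):
--             y = []
--             r = n
--             for t in toks:
--                 r, bit = divmod(r, 2)
--                 if bit:
--                     y.append(t)
--             parts.append('x'.join(y) if y else '.')
--     return '+'.join(parts)
-- ===== Notes on version B (the rewrite author's own statement) =====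
-- stated objective: simpler
-- what changed: A's recursive cartesian expansion into lists of factor choices followed by a dot-stripping cleanup pass is replaced by a per-group bit-counter subset enumeration: each factor expands to either a dot placeholder or its token and placeholders are stripped, so every combo is a subset of the group's real tokens, selected by the bits of a single counter and emitted directly as a string.
import Mathlib
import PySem

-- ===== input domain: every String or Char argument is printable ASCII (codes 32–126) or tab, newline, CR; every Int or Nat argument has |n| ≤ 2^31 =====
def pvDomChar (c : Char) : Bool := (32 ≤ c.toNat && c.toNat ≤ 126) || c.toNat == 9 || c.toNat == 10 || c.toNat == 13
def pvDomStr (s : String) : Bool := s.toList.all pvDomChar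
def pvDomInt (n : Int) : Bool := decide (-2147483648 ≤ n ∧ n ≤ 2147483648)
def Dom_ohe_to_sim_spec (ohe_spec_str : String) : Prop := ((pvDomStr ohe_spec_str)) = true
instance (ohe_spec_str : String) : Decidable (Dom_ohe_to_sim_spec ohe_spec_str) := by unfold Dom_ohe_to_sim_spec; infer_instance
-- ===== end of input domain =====

-- B replaces A's recursive product expansion by a bit-counter subset enumeration per group
-- (objective: simpler — no intermediate list-of-lists expansion, '.'-cleanup fused in).

-- ===== PORT A =====
-- iterating a Python value that is either a str or a list of str: a str yields its chars
def pvIter (e : String ⊕ List String) : List String :=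
  match e with
  | Sum.inl s => s.toList.map (fun c => String.ofList [c])
  | Sum.inr l => l

def my_expand (x : List (String ⊕ List String)) : List (List String) :=
  match x with
  | a :: b =>
      let b_exp := my_expand b
      b_exp.flatMap (fun z => (pvIter a).map (fun y => y :: z))
  | [] => [[]]       -- len(x) == 0: return [x] = [[]]

def ohe_to_sim_spec (ohe_spec_str : String) : String :=
  -- s.split(sep) with the nonempty literal seps '+'/'x': split? is always `some`
  let a := (PySem.Str.split? ohe_spec_str "+").getD []
  -- the in-place rewrite b[i][j] = ['.', z] for z != '.' as a nested map
  let b := a.map (fun z => ((PySem.Str.split? z "x").getD []).map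
      (fun t => if t ≠ "." then (Sum.inr [".", t] : String ⊕ List String) else Sum.inl t))
  -- the isinstance(b_el, str) branch can never fire: every b_el is a list here
  let c := b.foldl (fun acc b_el => if b_el.length ≥ 1 then acc ++ my_expand b_el else acc) []
  let sim_spec_list := c.foldl (fun acc x =>
      acc ++ [if (x.filter (fun z => z ≠ ".")).length = 0 then ["."]
              else x.filter (fun z => z ≠ ".")]) []
  PySem.Str.join "+" (sim_spec_list.map (fun z => PySem.Str.join "x" z))

-- ===== PORT B =====
-- the inner bit-decoding loop of B: y collects the tokens whose bit of n is set
def pvDecode (toks : List String) (n : Int) : List String :=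
  (toks.foldl (fun (st : Int × List String) t =>
      (PySem.Int.floordiv st.1 2,
       if PySem.Int.mod st.1 2 ≠ 0 then st.2 ++ [t] else st.2)) (n, [])).2

def ohe_to_sim_spec_alt (ohe_spec_str : String) : String :=
  let parts := ((PySem.Str.split? ohe_spec_str "+").getD []).foldl (fun parts g =>
    let toks := ((PySem.Str.split? g "x").getD []).filter (fun t => t ≠ ".")
    (PySem.List.pyRange 0 ((1 <<< toks.length : Nat) : Int) 1).foldl (fun parts n =>
      parts ++ [if pvDecode toks n ≠ [] then PySem.Str.join "x" (pvDecode toks n) else "."]) parts) []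
  PySem.Str.join "+" parts

-- ===== PRECONDITION & SPEC =====
def Spec_ohe_to_sim_spec (ohe_spec_str : String) (out : String) : Prop := out = ohe_to_sim_spec_alt ohe_spec_str
instance (ohe_spec_str : String) (out : String) : Decidable (Spec_ohe_to_sim_spec ohe_spec_str out) := by unfold Spec_ohe_to_sim_spec; infer_instance

-- ===== CLAIM (what is proved, stated in full; the proofs are below) =====
def Claim_equal_ohe_to_sim_spec : Prop := ∀ (ohe_spec_str : String), Dom_ohe_to_sim_spec ohe_spec_str → Spec_ohe_to_sim_spec ohe_spec_str (ohe_to_sim_spec ohe_spec_str)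

-- ===== LEMMAS AND PROOFS =====

-- the subsets of toks (kept in order), enumerated with the first token toggling fastest
def pvBitEnum : List String → List (List String)
  | [] => [[]]
  | t :: ts => (pvBitEnum ts).flatMap (fun z => [z, t :: z])

lemma pvGo_ne_nil (sep : List Char) (fuel : Nat) (s cur : List Char) (acc : List (List Char)) :
    PySem.Chars.splitOn.go sep fuel s cur acc ≠ [] := by
  induction fuel generalizing s cur acc with
  | zero => simp [PySem.Chars.splitOn.go]
  | succ fuel ih =>
    cases s with
    | nil => simp [PySem.Chars.splitOn.go]
    | cons c rest =>
      simp only [PySem.Chars.splitOn.go]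
      split
      · exact ih _ _ _
      · exact ih _ _ _

lemma pvSplit_ne_nil (s sep : String) (hs : sep.toList.isEmpty = false) :
    (PySem.Str.split? s sep).getD [] ≠ [] := by
  simp [PySem.Str.split?, PySem.Chars.split?, hs, PySem.Chars.splitOn]
  exact pvGo_ne_nil _ _ _ _ _

-- A side, per group: filtering the '.'s out of my_expand's combos gives the subset enumeration
lemma pvExpand_filter (ts : List String) :
    (my_expand (ts.map (fun t => if t ≠ "." then (Sum.inr [".", t] : String ⊕ List String) else Sum.inl t))).map
        (List.filter (fun z => z ≠ "."))
      = pvBitEnum (ts.filter (fun t => t ≠ ".")) := by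
  induction ts with
  | nil => simp [my_expand, pvBitEnum]
  | cons t ts ih =>
    by_cases ht : t = "."
    · subst ht
      have hpv : pvIter (Sum.inl ".") = ["."] := by decide
      rw [List.map_cons, if_neg (by simp), List.filter_cons, if_neg (by simp)]
      rw [show my_expand (Sum.inl "." :: ts.map (fun t => if t ≠ "." then (Sum.inr [".", t] : String ⊕ List String) else Sum.inl t))
            = (my_expand (ts.map (fun t => if t ≠ "." then (Sum.inr [".", t] : String ⊕ List String) else Sum.inl t))).flatMap
                (fun z => (pvIter (Sum.inl ".")).map (fun y => y :: z)) from rfl, hpv]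
      rw [List.map_flatMap]
      simp only [List.map_cons, List.map_nil, List.filter_cons]
      rw [← List.map_eq_flatMap]
      simpa using ih
    · have hne : t ≠ "." := ht
      have hpv : pvIter (Sum.inr [".", t] : String ⊕ List String) = [".", t] := rfl
      rw [List.map_cons, if_pos hne, List.filter_cons, if_pos (by simpa using hne)]
      rw [show my_expand ((Sum.inr [".", t] : String ⊕ List String) :: ts.map (fun t => if t ≠ "." then (Sum.inr [".", t] : String ⊕ List String) else Sum.inl t))
            = (my_expand (ts.map (fun t => if t ≠ "." then (Sum.inr [".", t] : String ⊕ List String) else Sum.inl t))).flatMap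
                (fun z => (pvIter (Sum.inr [".", t] : String ⊕ List String)).map (fun y => y :: z)) from rfl, hpv]
      rw [List.map_flatMap]
      rw [show pvBitEnum (t :: ts.filter (fun t => t ≠ "."))
            = (pvBitEnum (ts.filter (fun t => t ≠ "."))).flatMap (fun z => [z, t :: z]) from rfl]
      rw [← ih, List.flatMap_map]
      congr 1
      funext z
      simp [hne]

lemma pvDecode_acc (toks : List String) (r : Int) (y : List String) :
    (toks.foldl (fun (st : Int × List String) t =>
        (PySem.Int.floordiv st.1 2,
         if PySem.Int.mod st.1 2 ≠ 0 then st.2 ++ [t] else st.2)) (r, y)).2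
      = y ++ pvDecode toks r := by
  induction toks generalizing r y with
  | nil => simp [pvDecode]
  | cons t ts ih =>
    simp only [pvDecode, List.foldl_cons]
    rw [ih, ih]
    split <;> simp

lemma pvDecode_cons (t : String) (ts : List String) (n : Int) :
    pvDecode (t :: ts) n
      = (if PySem.Int.mod n 2 ≠ 0 then [t] else []) ++ pvDecode ts (PySem.Int.floordiv n 2) := by
  simp only [pvDecode, List.foldl_cons]
  rw [pvDecode_acc]
  split <;> simp [pvDecode]

lemma pvRange_double (K : Nat) :
    List.range (2 * K) = (List.range K).flatMap (fun k => [2 * k, 2 * k + 1]) := by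
  induction K with
  | zero => simp
  | succ K ih =>
    have h2 : 2 * (K + 1) = (2 * K + 1) + 1 := by omega
    rw [h2, List.range_succ, List.range_succ, List.range_succ, List.flatMap_append, ← ih]
    simp

lemma pvDecode_even (ts : List String) (t : String) (k : Int) :
    pvDecode (t :: ts) (2 * k) = pvDecode ts k := by
  rw [pvDecode_cons, PySem.Int.mod_eq_emod_of_pos (by omega),
    PySem.Int.floordiv_eq_ediv_of_pos (by omega)]
  have h1 : (2 * k) % 2 = 0 := by omega
  have h2 : (2 * k) / 2 = k := by omega
  rw [h1, h2]
  simp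

lemma pvDecode_odd (ts : List String) (t : String) (k : Int) :
    pvDecode (t :: ts) (2 * k + 1) = t :: pvDecode ts k := by
  rw [pvDecode_cons, PySem.Int.mod_eq_emod_of_pos (by omega),
    PySem.Int.floordiv_eq_ediv_of_pos (by omega)]
  have h1 : (2 * k + 1) % 2 = 1 := by omega
  have h2 : (2 * k + 1) / 2 = k := by omega
  rw [h1, h2]
  simp

-- B side, per group: the bit counter enumerates exactly the subsets, first token fastest
lemma pvDecode_enum (toks : List String) :
    (PySem.List.pyRange 0 ((1 <<< toks.length : Nat) : Int) 1).map (fun n => pvDecode toks n)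
      = pvBitEnum toks := by
  rw [PySem.List.pyRange_zero_natCast, List.map_map]
  induction toks with
  | nil =>
    rw [show (1 <<< ([] : List String).length : Nat) = 1 from rfl, List.range_one]
    simp [pvDecode, pvBitEnum]
  | cons t ts ih =>
    have hm : (1 <<< (t :: ts).length : Nat) = 2 * (1 <<< ts.length : Nat) := by
      simp [Nat.shiftLeft_eq, List.length_cons, pow_succ]; ring
    rw [hm, pvRange_double, List.map_flatMap]
    rw [show pvBitEnum (t :: ts) = (pvBitEnum ts).flatMap (fun z => [z, t :: z]) from rfl]
    rw [← ih, List.flatMap_map]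
    congr 1
    funext k
    simp only [Function.comp_apply, List.map_cons, List.map_nil]
    push_cast
    rw [pvDecode_even, pvDecode_odd]

-- the per-group part strings are equal
lemma pvGroup (g : String) :
    (if (((PySem.Str.split? g "x").getD []).map
            (fun t => if t ≠ "." then (Sum.inr [".", t] : String ⊕ List String) else Sum.inl t)).length ≥ 1
      then my_expand (((PySem.Str.split? g "x").getD []).map
            (fun t => if t ≠ "." then (Sum.inr [".", t] : String ⊕ List String) else Sum.inl t))
      else []).map
        (fun x => PySem.Str.join "x"
          (if (x.filter (fun z => z ≠ ".")).length = 0 then ["."] else x.filter (fun z => z ≠ ".")))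
    = (PySem.List.pyRange 0 ((1 <<< (((PySem.Str.split? g "x").getD []).filter (fun t => t ≠ ".")).length : Nat) : Int) 1).map
        (fun n => if pvDecode (((PySem.Str.split? g "x").getD []).filter (fun t => t ≠ ".")) n ≠ []
          then PySem.Str.join "x" (pvDecode (((PySem.Str.split? g "x").getD []).filter (fun t => t ≠ ".")) n)
          else ".") := by
  have hts : ((PySem.Str.split? g "x").getD []) ≠ [] := pvSplit_ne_nil g "x" (by decide)
  rw [if_pos (by
    rw [List.length_map]
    exact Nat.one_le_iff_ne_zero.mpr (by simpa [List.length_eq_zero_iff] using hts))]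
  calc
    (my_expand (((PySem.Str.split? g "x").getD []).map
          (fun t => if t ≠ "." then (Sum.inr [".", t] : String ⊕ List String) else Sum.inl t))).map
        (fun x => PySem.Str.join "x"
          (if (x.filter (fun z => z ≠ ".")).length = 0 then ["."] else x.filter (fun z => z ≠ ".")))
      = ((my_expand (((PySem.Str.split? g "x").getD []).map
            (fun t => if t ≠ "." then (Sum.inr [".", t] : String ⊕ List String) else Sum.inl t))).map
          (List.filter (fun z => z ≠ "."))).map
          (fun y => PySem.Str.join "x" (if y.length = 0 then ["."] else y)) := by
        rw [List.map_map]; rfl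
    _ = (pvBitEnum (((PySem.Str.split? g "x").getD []).filter (fun t => t ≠ "."))).map
          (fun y => PySem.Str.join "x" (if y.length = 0 then ["."] else y)) := by
        rw [pvExpand_filter]
    _ = (pvBitEnum (((PySem.Str.split? g "x").getD []).filter (fun t => t ≠ "."))).map
          (fun y => if y ≠ [] then PySem.Str.join "x" y else ".") := by
        refine List.map_congr_left (fun y _ => ?_)
        cases y with
        | nil => simpa using (by decide : PySem.Str.join "x" ["."] = ".")
        | cons h tl => simp
    _ = ((PySem.List.pyRange 0 ((1 <<< (((PySem.Str.split? g "x").getD []).filter (fun t => t ≠ ".")).length : Nat) : Int) 1).map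
          (fun n => pvDecode (((PySem.Str.split? g "x").getD []).filter (fun t => t ≠ ".")) n)).map
          (fun y => if y ≠ [] then PySem.Str.join "x" y else ".") := by
        rw [pvDecode_enum]
    _ = _ := by rw [List.map_map]; rfl

-- ===== VERDICT (by name: the statement is the Claim_ definition above) =====
theorem ohe_to_sim_spec_spec : Claim_equal_ohe_to_sim_spec := by
  intro s _
  unfold Spec_ohe_to_sim_spec
  simp only [ohe_to_sim_spec, ohe_to_sim_spec_alt]
  rw [show (fun (acc : List (List String)) (b_el : List (String ⊕ List String)) =>
        if b_el.length ≥ 1 then acc ++ my_expand b_el else acc)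
      = (fun acc b_el => acc ++ (if b_el.length ≥ 1 then my_expand b_el else [])) from
      funext (fun acc => funext (fun b_el => by split <;> simp))]
  simp only [PySem.List.foldl_append_eq_flatMap, List.nil_append]
  simp only [← List.map_eq_flatMap]
  rw [List.map_map, List.map_flatMap, List.flatMap_map]
  congr 1
  congr 1
  funext g
  simpa [Function.comp_def] using pvGroup g
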